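-- pv_equiv track=rewrite | github.com/Matthew-Pidlysny/Empirinometry | Program-Bin/MFT/Bin/je-suis-ballin.py | _is_periodic
-- ===== SOURCE A (Python) =====
-- from typing import Dict, List, Tuple, Any
--
-- def _is_periodic(cf: List[int]) -> bool:
--     """Check if continued fraction is periodic"""
--     if len(cf) < 4:
--         return False
--
--     # Check for repeating patterns
--     for period_len in range(1, len(cf) // 2):
--         period = cf[-period_len:]
--         if cf[-2*period_len:-period_len] == period:
--             return True
--
--     return False
-- ===== SOURCE B (Python) =====
-- from typing import Dict, List, Tuple, Any
--
-- def _is_periodic(cf: List[int]) -> bool: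
--     """Check if continued fraction is periodic (Z-algorithm on the reversed list, O(n))."""
--     n = len(cf)
--     if n < 4:
--         return False
--     s = cf[::-1]
--     z = [0] * n
--     z[0] = n
--     l = 0
--     r = 0
--     for i in range(1, n):
--         k = min(r - i, z[i - l]) if i < r else 0
--         while i + k < n and s[k] == s[i + k]:
--             k += 1
--         z[i] = k
--         if i + k > r:
--             l = i
--             r = i + k
--     return any(z[p] >= p for p in range(1, n // 2))
-- ===== Notes on version B (the rewrite author's own statement) =====
-- stated objective: faster
-- what changed: Replaced A's scan over every candidate period length with a fresh slice comparison each (O(n^2)) by one Z-algorithm pass over the reversed list, then reading off periods as z[p] >= p (O(n)).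
import Mathlib
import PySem

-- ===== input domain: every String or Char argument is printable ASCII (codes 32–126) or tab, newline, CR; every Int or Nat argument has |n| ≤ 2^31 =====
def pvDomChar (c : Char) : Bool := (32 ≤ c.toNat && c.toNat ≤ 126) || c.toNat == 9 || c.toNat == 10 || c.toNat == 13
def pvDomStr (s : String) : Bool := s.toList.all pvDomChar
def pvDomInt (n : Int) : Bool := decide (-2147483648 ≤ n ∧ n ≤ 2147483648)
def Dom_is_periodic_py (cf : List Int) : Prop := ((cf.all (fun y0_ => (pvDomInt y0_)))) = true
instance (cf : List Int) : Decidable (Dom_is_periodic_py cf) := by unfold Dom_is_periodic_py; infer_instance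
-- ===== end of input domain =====

-- B replaces A's quadratic scan over all candidate period lengths (each compared by slicing)
-- with a single Z-algorithm pass over the reversed list; objective: faster (asymptotic, O(n^2) → O(n)).

-- ===== PORT A =====
-- for period_len in range(1, len(cf)//2): if cf[-2p:-p] == cf[-p:] (early return True) — ported as .any
def is_periodic_py (cf : List Int) : Bool :=
  if cf.length < 4 then false
  else
    (PySem.List.pyRange 1 (PySem.Int.floordiv (cf.length : Int) 2) 1).any
      (fun p =>
        PySem.List.slice cf (some (-(2 * p))) (some (-p)) == PySem.List.slice cf (some (-p)) none)

-- ===== PORT B =====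
-- the inner 'while i + k < n and s[k] == s[i + k]: k += 1' of Source B
def pvExtend (s : List Int) (i k : Nat) : Nat :=
  if h : i + k < s.length ∧ s.getD k 0 = s.getD (i + k) 0 then pvExtend s i (k + 1) else k
termination_by s.length - (i + k)
decreasing_by omega

-- the 'for i in range(1, n)' loop of Source B, carrying the z array and the window [l, r)
def pvZLoop (s : List Int) (i : Nat) (z : List Nat) (l r : Nat) : List Nat :=
  if i < s.length then
    let k0 : Nat := if i < r then min (r - i) (z.getD (i - l) 0) else 0
    let k := pvExtend s i k0
    let z' := z.set i k
    if r < i + k then pvZLoop s (i + 1) z' i (i + k) else pvZLoop s (i + 1) z' l r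
  else z
termination_by s.length - i
decreasing_by all_goals omega

def is_periodic_py_alt (cf : List Int) : Bool :=
  let n := cf.length
  if n < 4 then false
  else
    -- s = cf[::-1] (exact: PySem.List.slice?_none_none_neg_one)
    let s := cf.reverse
    -- z = [0]*n; z[0] = n; then the main loop from i = 1
    let z := pvZLoop s 1 ((List.replicate n 0).set 0 n) 0 0
    -- any(z[p] >= p for p in range(1, n // 2))
    (List.range' 1 (n / 2 - 1)).any (fun p => decide (p ≤ z.getD p 0))

-- ===== PRECONDITION & SPEC =====
def Spec_is_periodic_py (cf : List Int) (out : Bool) : Prop := out = is_periodic_py_alt cf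
instance (cf : List Int) (out : Bool) : Decidable (Spec_is_periodic_py cf out) := by unfold Spec_is_periodic_py; infer_instance

-- ===== CLAIM (what is proved, stated in full; the proofs are below) =====
def Claim_equal_is_periodic_py : Prop := ∀ (cf : List Int), Dom_is_periodic_py cf → Spec_is_periodic_py cf (is_periodic_py cf)

-- ===== LEMMAS AND PROOFS =====

-- length of the longest common prefix of two lists
def lcpN : List Int → List Int → Nat
  | a :: as, b :: bs => if a = b then lcpN as bs + 1 else 0
  | _, _ => 0

-- the Z-function value the loop is meant to compute at index i
def Zf (s : List Int) (i : Nat) : Nat := lcpN s (s.drop i)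

lemma lcpN_le_right : ∀ a b : List Int, lcpN a b ≤ b.length := by
  intro a
  induction a with
  | nil => intro b; cases b <;> simp [lcpN]
  | cons x xs ih =>
    intro b
    cases b with
    | nil => simp [lcpN]
    | cons y ys =>
      simp only [lcpN]
      split_ifs
      · have := ih ys; simp; omega
      · simp

lemma lcpN_self : ∀ a : List Int, lcpN a a = a.length := by
  intro a
  induction a with
  | nil => simp [lcpN]
  | cons x xs ih => simp [lcpN, ih]

lemma lcpN_getD_eq : ∀ (a b : List Int) (j : Nat), j < lcpN a b → a.getD j 0 = b.getD j 0 := by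
  intro a
  induction a with
  | nil => intro b j h; cases b <;> simp [lcpN] at h
  | cons x xs ih =>
    intro b j h
    cases b with
    | nil => simp [lcpN] at h
    | cons y ys =>
      simp only [lcpN] at h
      split_ifs at h with hxy
      · cases j with
        | zero => simpa using hxy
        | succ j' => simpa using ih ys j' (by omega)
      · omega

lemma lcpN_mismatch : ∀ (a b : List Int), lcpN a b < a.length → lcpN a b < b.length →
    a.getD (lcpN a b) 0 ≠ b.getD (lcpN a b) 0 := by
  intro a
  induction a with
  | nil => intro b h1 _; simp at h1
  | cons x xs ih =>
    intro b h1 h2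
    cases b with
    | nil => simp at h2
    | cons y ys =>
      simp only [lcpN] at *
      split_ifs at * with hxy
      · simpa using ih ys (by simpa using h1) (by simpa using h2)
      · simpa using hxy

lemma le_lcpN : ∀ (a b : List Int) (k : Nat), k ≤ a.length → k ≤ b.length →
    (∀ j, j < k → a.getD j 0 = b.getD j 0) → k ≤ lcpN a b := by
  intro a
  induction a with
  | nil => intro b k h1 _ _; simp at h1; omega
  | cons x xs ih =>
    intro b k h1 h2 h3
    cases b with
    | nil => simp at h2; omega
    | cons y ys =>
      cases k with
      | zero => omega
      | succ k' =>
        have hxy : x = y := by simpa using h3 0 (by omega)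
        simp only [lcpN, if_pos hxy]
        have := ih ys k' (by simpa using h1) (by simpa using h2)
          (fun j hj => by simpa using h3 (j + 1) (by omega))
        omega

lemma getD_drop (s : List Int) (i j : Nat) : (s.drop i).getD j 0 = s.getD (i + j) 0 := by
  simp [List.getD, List.getElem?_drop]

lemma Zf_le_sub (s : List Int) (i : Nat) : Zf s i ≤ s.length - i := by
  have := lcpN_le_right s (s.drop i)
  simpa [Zf] using this

-- the while loop computes Zf s i from any prefix-matching start value
lemma pvExtend_eq (s : List Int) (i : Nat) :
    ∀ (m k : Nat), Zf s i - k = m → k ≤ Zf s i → pvExtend s i k = Zf s i := by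
  intro m
  induction m with
  | zero =>
    intro k hm hk
    have hk' : k = Zf s i := by omega
    rw [pvExtend]
    have hcond : ¬(i + k < s.length ∧ s.getD k 0 = s.getD (i + k) 0) := by
      rintro ⟨h1, h2⟩
      have hlt1 : lcpN s (s.drop i) < s.length := by
        have : Zf s i < s.length := by omega
        simpa [Zf] using this
      have hlt2 : lcpN s (s.drop i) < (s.drop i).length := by
        simp only [List.length_drop]
        have : Zf s i < s.length - i := by omega
        simpa [Zf] using this
      apply lcpN_mismatch s (s.drop i) hlt1 hlt2
      rw [getD_drop]
      show s.getD (lcpN s (s.drop i)) 0 = s.getD (i + lcpN s (s.drop i)) 0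
      rw [show lcpN s (s.drop i) = k from (by simpa [Zf] using hk'.symm)]
      exact h2
    rw [dif_neg hcond]
    exact hk'
  | succ m' ih =>
    intro k hm hk
    have hlt : k < Zf s i := by omega
    rw [pvExtend]
    have h1 : i + k < s.length := by
      have := Zf_le_sub s i
      omega
    have h2 : s.getD k 0 = s.getD (i + k) 0 := by
      have := lcpN_getD_eq s (s.drop i) k (by simpa [Zf] using hlt)
      rwa [getD_drop] at this
    rw [dif_pos ⟨h1, h2⟩]
    exact ih (k + 1) (by omega) (by omega)

-- main loop invariant: the processed prefix of z holds the Z-function, and the window [l, r) is valid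
lemma pvZLoop_spec (s : List Int) :
    ∀ (m i : Nat) (z : List Nat) (l r : Nat), s.length - i = m → 1 ≤ i →
      z.length = s.length →
      (∀ j, j < i → z.getD j 0 = Zf s j) →
      ((l = 0 ∧ r = 0) ∨ (1 ≤ l ∧ l < i ∧ r ≤ l + Zf s l)) →
      ∀ j, j < s.length → (pvZLoop s i z l r).getD j 0 = Zf s j := by
  intro m
  induction m with
  | zero =>
    intro i z l r hm hi hlen hz hw j hj
    rw [pvZLoop, if_neg (by omega)]
    exact hz j (by omega)
  | succ m' ih =>
    intro i z l r hm hi hlen hz hw j hj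
    have hin : i < s.length := by omega
    have hk0 : (if i < r then min (r - i) (z.getD (i - l) 0) else 0) ≤ Zf s i := by
      split_ifs with hir
      · -- window case
        rcases hw with ⟨hl0, hr0⟩ | ⟨hl1, hli, hlr⟩
        · omega
        · have hzil : z.getD (i - l) 0 = Zf s (i - l) := hz (i - l) (by omega)
          rw [hzil]
          set k0 := min (r - i) (Zf s (i - l)) with hk0def
          have hZl : Zf s l ≤ s.length - l := Zf_le_sub s l
          have hrn : r ≤ s.length := by omega
          apply le_lcpN s (s.drop i) k0
          · omega
          · simp only [List.length_drop]; omega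
          · intro j' hj'
            rw [getD_drop]
            have hj1 : j' < Zf s (i - l) := by omega
            have e1 : s.getD j' 0 = s.getD ((i - l) + j') 0 := by
              have := lcpN_getD_eq s (s.drop (i - l)) j' (by simpa [Zf] using hj1)
              rwa [getD_drop] at this
            have hj2 : (i - l) + j' < Zf s l := by omega
            have e2 : s.getD ((i - l) + j') 0 = s.getD (i + j') 0 := by
              have := lcpN_getD_eq s (s.drop l) ((i - l) + j') (by simpa [Zf] using hj2)
              rw [getD_drop] at this
              rwa [show l + ((i - l) + j') = i + j' from by omega] at this
            rw [e1, e2]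
      · omega
    rw [pvZLoop, if_pos hin]
    simp only []
    have hext : pvExtend s i (if i < r then min (r - i) (z.getD (i - l) 0) else 0) = Zf s i :=
      pvExtend_eq s i _ _ rfl hk0
    rw [hext]
    have hlen' : (z.set i (Zf s i)).length = s.length := by simpa using hlen
    have hz' : ∀ j', j' < i + 1 → (z.set i (Zf s i)).getD j' 0 = Zf s j' := by
      intro j' hj'
      by_cases hji : j' = i
      · subst hji
        simp [List.getD, hlen ▸ hin]
      · have : j' < i := by omega
        rw [List.getD, List.getElem?_set_ne (by omega)]
        exact hz j' this
    split_ifs with hrk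
    · exact ih (i + 1) _ i (i + Zf s i) (by omega) (by omega) hlen' hz'
        (Or.inr ⟨by omega, by omega, by omega⟩) j hj
    · have hw' : ((l = 0 ∧ r = 0) ∨ (1 ≤ l ∧ l < i + 1 ∧ r ≤ l + Zf s l)) := by
        rcases hw with ⟨hl0, hr0⟩ | ⟨hl1, hli, hlr⟩
        · exfalso; omega
        · exact Or.inr ⟨hl1, by omega, hlr⟩
      exact ih (i + 1) _ l r (by omega) (by omega) hlen' hz' hw' j hj

-- a prefix of length k is shared iff all positions below k agree
lemma take_eq_iff_getD (a b : List Int) (k : Nat) (ha : k ≤ a.length) (hb : k ≤ b.length) :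
    a.take k = b.take k ↔ ∀ j, j < k → a.getD j 0 = b.getD j 0 := by
  constructor
  · intro h j hj
    have : (a.take k).getD j 0 = (b.take k).getD j 0 := by rw [h]
    simpa [List.getD, List.getElem?_take, hj] using this
  · intro h
    apply List.ext_getElem
    · simp; omega
    · intro j h1 h2
      have hj : j < k := by simp at h1; omega
      have := h j hj
      simp only [List.getD] at this
      rw [List.getElem?_eq_getElem (by omega), List.getElem?_eq_getElem (by omega)] at this
      simpa [List.getElem_take] using this

-- A's slice condition at period q is exactly 'q ≤ Z of the reversed list at q'
lemma slice_cond_iff (cf : List Int) (q : Nat) (h1 : 1 ≤ q) (h2 : 2 * q ≤ cf.length) :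
    ((cf.drop (cf.length - 2 * q)).take q = cf.drop (cf.length - q)) ↔
      q ≤ Zf cf.reverse q := by
  set n := cf.length with hn
  set s := cf.reverse with hs
  have hsl : s.length = n := by simp [hs, hn]
  have e1 : cf.drop (n - q) = (s.take q).reverse := by
    rw [hs, List.take_reverse, List.reverse_reverse]
  have e2 : (cf.drop (n - 2 * q)).take q = ((s.drop q).take q).reverse := by
    have h0 : cf.drop (n - 2 * q) = (s.take (2 * q)).reverse := by
      rw [hs, List.take_reverse, List.reverse_reverse]
    have hlen2q : (s.take (2 * q)).length = 2 * q := by simp [hsl]; omega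
    rw [h0, List.take_reverse, hlen2q, show 2 * q - q = q from by omega, List.drop_take,
      show 2 * q - q = q from by omega]
  rw [e1, e2]
  have hrev : ((s.drop q).take q).reverse = (s.take q).reverse ↔
      (s.drop q).take q = s.take q := by
    constructor
    · intro h; have := congrArg List.reverse h; simpa using this
    · intro h; rw [h]
  rw [hrev]
  have hql : q ≤ s.length := by omega
  have hqd : q ≤ (s.drop q).length := by simp [hsl]; omega
  rw [take_eq_iff_getD _ _ q hqd hql]
  constructor
  · intro h
    apply le_lcpN s (s.drop q) q hql hqd
    intro j hj
    exact (h j hj).symm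
  · intro h j hj
    have := lcpN_getD_eq s (s.drop q) j (by unfold Zf at h; omega)
    exact this.symm

-- characterization of port B for n ≥ 4
lemma alt_iff (cf : List Int) (h4 : ¬ cf.length < 4) :
    is_periodic_py_alt cf = true ↔
      ∃ q : Nat, 1 ≤ q ∧ q < cf.length / 2 ∧ q ≤ Zf cf.reverse q := by
  set n := cf.length with hn
  set s := cf.reverse with hs
  have hsl : s.length = n := by simp [hs, hn]
  have hzeq : ∀ j, j < n →
      (pvZLoop s 1 ((List.replicate n 0).set 0 n) 0 0).getD j 0 = Zf s j := by
    intro j hj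
    apply pvZLoop_spec s (s.length - 1) 1 _ 0 0 rfl (by omega) (by simp [hsl])
    · intro j' hj'
      have : j' = 0 := by omega
      subst this
      have hn0 : 0 < n := by omega
      have : Zf s 0 = n := by simp [Zf, lcpN_self, hsl]
      rw [this, List.getD, List.getElem?_set_self (by simpa using hn0)]
      simp
    · exact Or.inl ⟨rfl, rfl⟩
    · omega
  rw [is_periodic_py_alt]
  simp only [← hn, ← hs, if_neg h4, List.any_eq_true, List.mem_range'_1, decide_eq_true_eq]
  constructor
  · rintro ⟨p, ⟨hp1, hp2⟩, hp3⟩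
    refine ⟨p, hp1, by omega, ?_⟩
    rwa [hzeq p (by omega)] at hp3
  · rintro ⟨q, hq1, hq2, hq3⟩
    have hn2 : 2 ≤ n / 2 := by omega
    refine ⟨q, ⟨hq1, by omega⟩, ?_⟩
    rwa [hzeq q (by omega)]

-- characterization of port A for n ≥ 4
lemma a_iff (cf : List Int) (h4 : ¬ cf.length < 4) :
    is_periodic_py cf = true ↔
      ∃ q : Nat, 1 ≤ q ∧ q < cf.length / 2 ∧
        (cf.drop (cf.length - 2 * q)).take q = cf.drop (cf.length - q) := by
  set n := cf.length with hn
  have hfd : PySem.Int.floordiv (n : Int) 2 = ((n / 2 : Nat) : Int) := by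
    exact_mod_cast PySem.Int.floordiv_natCast n 2
  rw [is_periodic_py]
  simp only [← hn, if_neg h4, List.any_eq_true, PySem.List.mem_pyRange_one, hfd, beq_iff_eq]
  constructor
  · rintro ⟨p, ⟨hp1, hp2⟩, hp3⟩
    obtain ⟨q, rfl⟩ : ∃ q : Nat, p = (q : Int) := ⟨p.toNat, by omega⟩
    have hq1 : 1 ≤ q := by exact_mod_cast hp1
    have hq2 : q < n / 2 := by exact_mod_cast hp2
    refine ⟨q, hq1, hq2, ?_⟩
    have h2q : 2 * q ≤ n := by omega
    rw [show -(2 * (q : Int)) = -((2 * q : Nat) : Int) from by push_cast; ring,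
      PySem.List.slice_from_neg_natCast cf q (by omega)] at hp3
    have hclamp : PySem.List.slice cf (some (-((2 * q : Nat) : Int))) (some (-(q : Int))) =
        (cf.drop (n - 2 * q)).take q := by
      simp only [PySem.List.slice, PySem.List.clampIdx_neg_natCast _ _ (by omega : 0 < 2 * q),
        PySem.List.clampIdx_neg_natCast _ _ (by omega : 0 < q)]
      rw [← hn, show n - q - (n - 2 * q) = q from by omega]
    rwa [hclamp] at hp3
  · rintro ⟨q, hq1, hq2, hq3⟩
    have h2q : 2 * q ≤ n := by omega
    refine ⟨(q : Int), ⟨by exact_mod_cast hq1, by exact_mod_cast hq2⟩, ?_⟩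
    rw [show -(2 * (q : Int)) = -((2 * q : Nat) : Int) from by push_cast; ring,
      PySem.List.slice_from_neg_natCast cf q (by omega)]
    have hclamp : PySem.List.slice cf (some (-((2 * q : Nat) : Int))) (some (-(q : Int))) =
        (cf.drop (n - 2 * q)).take q := by
      simp only [PySem.List.slice, PySem.List.clampIdx_neg_natCast _ _ (by omega : 0 < 2 * q),
        PySem.List.clampIdx_neg_natCast _ _ (by omega : 0 < q)]
      rw [← hn, show n - q - (n - 2 * q) = q from by omega]
    rwa [hclamp]

-- ===== VERDICT (by name: the statement is the Claim_ definition above) =====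
theorem is_periodic_py_spec : Claim_equal_is_periodic_py := by
  intro cf _
  show is_periodic_py cf = is_periodic_py_alt cf
  by_cases h4 : cf.length < 4
  · rw [is_periodic_py, is_periodic_py_alt]
    simp [h4]
  · rw [Bool.eq_iff_iff, a_iff cf h4, alt_iff cf h4]
    constructor
    · rintro ⟨q, hq1, hq2, hq3⟩
      exact ⟨q, hq1, hq2, (slice_cond_iff cf q hq1 (by omega)).mp hq3⟩
    · rintro ⟨q, hq1, hq2, hq3⟩
      exact ⟨q, hq1, hq2, (slice_cond_iff cf q hq1 (by omega)).mpr hq3⟩
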